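-- pv_equiv track=rewrite | github.com/ikolton/AI_Fundamentals-labs | Lab1/Zad5.py | sum_of_list
-- ===== SOURCE A (Python) =====
-- def sum_of_list(list):
--     sum = 0
--     difference = 0;
--     product = 1;
--     for i in list:
--         sum += i
--
--     for i in list:
--         difference -= i
--
--     for i in list:
--         product *= i
--
--     return (sum, difference, product)
-- ===== SOURCE B (Python) =====
-- def sum_of_list(list):
--     s = 0
--     d = 0
--     p = 1
--     for i in list:
--         s += i
--         d -= i
--         p *= i
--     return (s, d, p)
-- ===== Notes on version B (the rewrite author's own statement) =====
-- stated objective: simpler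
-- what changed: The three separate passes over the list (one each for sum, difference, product) are fused into a single loop maintaining three accumulators at once.
import Mathlib
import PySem

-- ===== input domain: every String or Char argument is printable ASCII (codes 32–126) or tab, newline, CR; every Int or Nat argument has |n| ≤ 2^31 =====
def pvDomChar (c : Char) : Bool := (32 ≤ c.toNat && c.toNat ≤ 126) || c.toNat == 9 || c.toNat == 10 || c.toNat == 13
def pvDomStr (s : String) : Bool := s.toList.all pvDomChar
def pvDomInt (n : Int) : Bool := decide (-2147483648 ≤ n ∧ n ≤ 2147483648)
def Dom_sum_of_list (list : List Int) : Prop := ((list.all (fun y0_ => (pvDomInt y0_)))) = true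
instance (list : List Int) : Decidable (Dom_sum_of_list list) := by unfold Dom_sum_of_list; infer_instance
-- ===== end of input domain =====

-- B fuses A's three separate passes (sum, difference, product) into one loop with three accumulators; objective: simpler.


-- ===== PORT A =====
-- A: three separate for-loops, one per accumulator.
def sum_of_list (list : List Int) : Int × Int × Int :=
  let sum := list.foldl (fun s i => s + i) 0
  let difference := list.foldl (fun d i => d - i) 0
  let product := list.foldl (fun p i => p * i) 1
  (sum, difference, product)

-- ===== PORT B =====
-- B: one loop updating the triple (s, d, p) simultaneously.
def sum_of_list_alt (list : List Int) : Int × Int × Int :=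
  list.foldl (fun (acc : Int × Int × Int) i => (acc.1 + i, acc.2.1 - i, acc.2.2 * i)) (0, 0, 1)

-- ===== PRECONDITION & SPEC =====
def Spec_sum_of_list (list : List Int) (out : Int × Int × Int) : Prop := out = sum_of_list_alt list
instance (list : List Int) (out : Int × Int × Int) : Decidable (Spec_sum_of_list list out) := by unfold Spec_sum_of_list; infer_instance

-- ===== CLAIM (what is proved, stated in full; the proofs are below) =====
def Claim_equal_sum_of_list : Prop := ∀ (list : List Int), Dom_sum_of_list list → Spec_sum_of_list list (sum_of_list list)

-- ===== LEMMAS AND PROOFS =====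
theorem fused_foldl (list : List Int) (s d p : Int) :
    list.foldl (fun (acc : Int × Int × Int) i => (acc.1 + i, acc.2.1 - i, acc.2.2 * i)) (s, d, p)
      = (list.foldl (fun a i => a + i) s,
         list.foldl (fun a i => a - i) d,
         list.foldl (fun a i => a * i) p) := by
  induction list generalizing s d p with
  | nil => rfl
  | cons x xs ih => simp [List.foldl, ih]

-- ===== VERDICT (by name: the statement is the Claim_ definition above) =====
theorem sum_of_list_spec : Claim_equal_sum_of_list := by
  intro list _
  unfold Spec_sum_of_list sum_of_list sum_of_list_alt
  simp [fused_foldl]
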